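-- pv_equiv track=rewrite | github.com/kase1111-hash/SDR | src/sdr_module/dsp/protocols.py | _decode_alpha
-- ===== SOURCE A (Python) =====
-- from typing import Optional, List, Tuple, Callable, Dict, Any
--
-- def _decode_alpha(words: List[int]) -> str:
--     """Decode alphanumeric message from words."""
--     result = ""
--
--     for word in words:
--         # Extract 7-bit characters
--         for i in range(4):
--             char_code = (word >> (21 - i * 7)) & 0x7F
--             if 32 <= char_code < 127:
--                 result += chr(char_code)
--             elif char_code == 0:
--                 return result
--
--     return result
-- ===== SOURCE B (Python) =====
-- def _decode_alpha(words):
--     """Decode alphanumeric message from words."""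
--     codes = [(w >> s) & 0x7F for w in words for s in (21, 14, 7, 0)]
--     if 0 in codes:
--         codes = codes[:codes.index(0)]
--     return ''.join(chr(c) for c in codes if 32 <= c < 127)
-- ===== Notes on version B (the rewrite author's own statement) =====
-- stated objective: alternative
-- what changed: B replaces A's nested loops with early return by a flat pipeline: build the full list of 7-bit codes, truncate it at the first zero code via index+slice, then filter printable codes and join.
import Mathlib
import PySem

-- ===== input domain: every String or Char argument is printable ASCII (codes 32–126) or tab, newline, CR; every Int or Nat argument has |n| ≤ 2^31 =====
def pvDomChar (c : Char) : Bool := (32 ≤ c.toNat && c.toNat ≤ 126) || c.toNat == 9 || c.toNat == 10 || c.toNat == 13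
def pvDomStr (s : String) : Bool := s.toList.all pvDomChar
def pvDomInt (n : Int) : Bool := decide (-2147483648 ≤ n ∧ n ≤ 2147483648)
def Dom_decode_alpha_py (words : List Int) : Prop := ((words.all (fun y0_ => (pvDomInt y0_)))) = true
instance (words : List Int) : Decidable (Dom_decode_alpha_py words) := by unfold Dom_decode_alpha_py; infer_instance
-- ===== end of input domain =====

-- B restructures A's nested loops + early return into a flat pipeline (codes, truncate at first 0, filter, join); same cost, different decomposition.
-- Strings are built as List Char and converted at the end (PySem convention): Python's `result += chr(c)` is `acc ++ [Char.ofNat c.toNat]`.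
-- Python `(w >> s) & 0x7F` (s ≥ 0) is exactly `PySem.Int.mod (PySem.Int.floordiv w (2^s)) 128` (arithmetic shift = floor division; mask = Python mod).

-- ===== PORT A =====
-- char_code = (word >> (21 - i*7)) & 0x7F
def pvA_code (w : Int) (i : Nat) : Int :=
  PySem.Int.mod (PySem.Int.floordiv w (2 ^ (21 - i * 7))) 128

-- inner `for i in range(4)` loop; Bool = "the early `return result` fired"
def pvA_word (w : Int) : List Nat → List Char → List Char × Bool
  | [], acc => (acc, false)
  | i :: is, acc =>
    let c := pvA_code w i
    if 32 ≤ c ∧ c < 127 then pvA_word w is (acc ++ [Char.ofNat c.toNat])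
    else if c = 0 then (acc, true)
    else pvA_word w is acc

-- outer `for word in words` loop
def pvA_loop : List Int → List Char → List Char
  | [], acc => acc
  | w :: ws, acc =>
    match pvA_word w [0, 1, 2, 3] acc with
    | (r, true) => r
    | (r, false) => pvA_loop ws r

def decode_alpha_py (words : List Int) : String :=
  String.ofList (pvA_loop words [])

-- ===== PORT B =====
-- codes = [(w >> s) & 0x7F for w in words for s in (21, 14, 7, 0)]
def pvB_codes (words : List Int) : List Int :=
  words.flatMap (fun w =>
    ([21, 14, 7, 0] : List Nat).map (fun s => PySem.Int.mod (PySem.Int.floordiv w (2 ^ s)) 128))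

-- if 0 in codes: codes = codes[:codes.index(0)]   (index cannot fail under the guard; none-branch is a totality guard)
def pvB_trunc (codes : List Int) : List Int :=
  if codes.contains 0 then
    match PySem.List.index? codes 0 with
    | some k => PySem.List.slice codes none (some (k : Int))
    | none => codes
  else codes

def decode_alpha_py_alt (words : List Int) : String :=
  String.ofList (((pvB_trunc (pvB_codes words)).filter
    (fun c => decide (32 ≤ c ∧ c < 127))).map (fun c => Char.ofNat c.toNat))

-- ===== PRECONDITION & SPEC =====
def Spec_decode_alpha_py (words : List Int) (out : String) : Prop := out = decode_alpha_py_alt words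
instance (words : List Int) (out : String) : Decidable (Spec_decode_alpha_py words out) := by unfold Spec_decode_alpha_py; infer_instance

-- ===== CLAIM (what is proved, stated in full; the proofs are below) =====
def Claim_equal_decode_alpha_py : Prop := ∀ (words : List Int), Dom_decode_alpha_py words → Spec_decode_alpha_py words (decode_alpha_py words)

-- ===== LEMMAS AND PROOFS =====

-- uniform processor over the flat code stream, mirroring A's body
def pvProc : List Int → List Char → List Char × Bool
  | [], acc => (acc, false)
  | c :: cs, acc =>
    if 32 ≤ c ∧ c < 127 then pvProc cs (acc ++ [Char.ofNat c.toNat])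
    else if c = 0 then (acc, true)
    else pvProc cs acc

lemma pvA_word_eq_proc (w : Int) (is : List Nat) (acc : List Char) :
    pvA_word w is acc = pvProc (is.map (pvA_code w)) acc := by
  induction is generalizing acc with
  | nil => simp [pvA_word, pvProc]
  | cons i is ih => simp only [pvA_word, pvProc, List.map_cons]; split_ifs <;> simp [ih]

lemma pvProc_append (xs ys : List Int) (acc : List Char) :
    pvProc (xs ++ ys) acc =
      match pvProc xs acc with
      | (r, true) => (r, true)
      | (r, false) => pvProc ys r := by
  induction xs generalizing acc with
  | nil => simp [pvProc]
  | cons c cs ih => simp only [List.cons_append, pvProc]; split_ifs <;> simp [ih]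

lemma pvA_loop_eq_proc (ws : List Int) (acc : List Char) :
    pvA_loop ws acc = (pvProc (ws.flatMap (fun w => ([0,1,2,3] : List Nat).map (pvA_code w))) acc).1 := by
  induction ws generalizing acc with
  | nil => simp [pvA_loop, pvProc]
  | cons w ws ih =>
    simp only [pvA_loop, List.flatMap_cons, pvProc_append, pvA_word_eq_proc]
    rcases h : pvProc (([0,1,2,3] : List Nat).map (pvA_code w)) acc with ⟨r, b⟩
    cases b <;> simp [ih]

lemma pvProc_fst (L : List Int) (acc : List Char) :
    (pvProc L acc).1 =
      acc ++ ((L.takeWhile (fun c => c != 0)).filter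
        (fun c => decide (32 ≤ c ∧ c < 127))).map (fun c => Char.ofNat c.toNat) := by
  induction L generalizing acc with
  | nil => simp [pvProc]
  | cons c cs ih =>
    simp only [pvProc]
    by_cases h1 : 32 ≤ c ∧ c < 127
    · have hne : (c != 0) = true := by simp; omega
      simp [h1, hne, ih]
    · by_cases h0 : c = 0
      · simp [h0, List.takeWhile_cons]
      · have hne : (c != 0) = true := by simp [h0]
        simp [h1, h0, hne, ih]

lemma pvTrunc_eq_takeWhile (L : List Int) :
    pvB_trunc L = L.takeWhile (fun c => c != 0) := by
  induction L with
  | nil => simp [pvB_trunc]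
  | cons c cs ih =>
    unfold pvB_trunc at ih ⊢
    by_cases h0 : c = 0
    · subst h0
      rw [if_pos (by simp), PySem.List.index?_cons_self]
      show PySem.List.slice (0 :: cs) none (some ((0 : Nat) : Int)) = _
      rw [PySem.List.slice_to_natCast]
      simp
    · have hne : (c != 0) = true := by simp [h0]
      by_cases hm : (0 : Int) ∈ cs
      · obtain ⟨k, hk⟩ := Option.isSome_iff_exists.mp ((PySem.List.index?_isSome_iff cs 0).mpr hm)
        rw [if_pos (by simp [hm]), PySem.List.index?_cons_of_ne _ h0, hk]
        rw [if_pos (by simp [hm]), hk] at ih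
        show PySem.List.slice (c :: cs) none (some ((k : Int) + 1)) = _
        replace ih : PySem.List.slice cs none (some ((k : Nat) : Int)) = List.takeWhile (fun c => c != 0) cs := ih
        have h1 : ((k : Int) + 1) = ((k + 1 : Nat) : Int) := by push_cast; ring
        rw [h1, PySem.List.slice_to_natCast]
        rw [PySem.List.slice_to_natCast] at ih
        simp [hne, ih]
      · have hc : ¬ ((c :: cs).contains 0 = true) := by
          simp [hm]; exact fun h => h0 h.symm
        rw [if_neg hc]
        rw [if_neg (by simp [hm])] at ih
        rw [List.takeWhile_cons, hne]
        simp [← ih]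


lemma pvB_codes_eq (words : List Int) :
    pvB_codes words = words.flatMap (fun w => ([0,1,2,3] : List Nat).map (pvA_code w)) := by
  simp [pvB_codes, pvA_code]

-- ===== VERDICT (by name: the statement is the Claim_ definition above) =====
theorem decode_alpha_py_spec : Claim_equal_decode_alpha_py := by
  intro words _
  unfold Spec_decode_alpha_py decode_alpha_py decode_alpha_py_alt
  rw [pvA_loop_eq_proc, pvProc_fst, pvB_codes_eq, pvTrunc_eq_takeWhile]
  simp only [List.nil_append]
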